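-- pv_equiv track=rewrite | github.com/lkubicki/python | tram.py | podaj_zakres_przystankow
-- ===== SOURCE A (Python) =====
-- def podaj_zakres_przystankow(przystanki):
--     pierwszy = 0
--     ostatni = len(przystanki)-1
--     for i in range(len(przystanki)):
--         if przystanki[pierwszy] == '_':
--             pierwszy = pierwszy + 1
--         if przystanki[i] != '_':
--             ostatni = i
--     return pierwszy, ostatni
-- ===== SOURCE B (Python) =====
-- def podaj_zakres_przystankow(przystanki):
--     pierwszy = 0
--     while pierwszy < len(przystanki) and przystanki[pierwszy] == '_':
--         pierwszy += 1
--     ostatni = len(przystanki) - 1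
--     for i in reversed(range(len(przystanki))):
--         if przystanki[i] != '_':
--             ostatni = i
--             break
--     return pierwszy, ostatni
-- ===== Notes on version B (the rewrite author's own statement) =====
-- stated objective: simpler
-- what changed: Replaces the single interleaved loop (advancing 'pierwszy' and re-assigning 'ostatni' on every iteration) with two independent passes: a while loop that skips leading underscores, and a reverse scan that breaks at the first non-underscore.
import Mathlib
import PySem

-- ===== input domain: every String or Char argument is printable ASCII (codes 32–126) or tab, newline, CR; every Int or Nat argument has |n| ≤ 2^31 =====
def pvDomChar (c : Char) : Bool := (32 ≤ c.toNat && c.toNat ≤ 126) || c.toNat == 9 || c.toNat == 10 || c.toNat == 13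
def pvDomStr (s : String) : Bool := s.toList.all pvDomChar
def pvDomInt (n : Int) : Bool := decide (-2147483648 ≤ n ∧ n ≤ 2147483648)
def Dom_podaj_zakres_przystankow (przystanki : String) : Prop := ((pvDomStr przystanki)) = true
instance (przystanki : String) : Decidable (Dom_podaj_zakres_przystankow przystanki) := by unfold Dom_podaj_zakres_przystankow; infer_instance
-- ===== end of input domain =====

-- B replaces A's single interleaved loop by two independent passes (skip leading
-- underscores; reverse scan breaking at the first non-underscore): simpler, same cost.

-- ===== PORT A =====
-- one loop over i, updating both `pierwszy` and `ostatni`; przystanki[pierwszy]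
-- is always in range (pierwszy ≤ i), so `.getD ' '` only makes the indexing total.
def podaj_zakres_przystankow (przystanki : String) : Int × Int :=
  let l := przystanki.toList
  let n := l.length
  (List.range n).foldl
    (fun (st : Int × Int) (i : Nat) =>
      let pierwszy := if (PySem.List.pyGet? l st.1).getD ' ' == '_' then st.1 + 1 else st.1
      let ostatni : Int := if l.getD i ' ' != '_' then (i : Int) else st.2
      (pierwszy, ostatni))
    (0, (n : Int) - 1)

-- ===== PORT B =====
-- first pass: the while loop skipping leading underscores, as structural recursion
def altLead : List Char → Int
  | [] => 0
  | c :: t => if c == '_' then 1 + altLead t else 0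

-- second pass: `for i in reversed(range(n)): … break` = first hit of the reversed range
def podaj_zakres_przystankow_alt (przystanki : String) : Int × Int :=
  let l := przystanki.toList
  let n := l.length
  let pierwszy := altLead l
  let ostatni : Int :=
    match (List.range n).reverse.find? (fun i => l.getD i ' ' != '_') with
    | some i => (i : Int)
    | none => (n : Int) - 1
  (pierwszy, ostatni)

-- ===== PRECONDITION & SPEC =====
def Spec_podaj_zakres_przystankow (przystanki : String) (out : Int × Int) : Prop := out = podaj_zakres_przystankow_alt przystanki
instance (przystanki : String) (out : Int × Int) : Decidable (Spec_podaj_zakres_przystankow przystanki out) := by unfold Spec_podaj_zakres_przystankow; infer_instance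

-- ===== CLAIM (what is proved, stated in full; the proofs are below) =====
def Claim_equal_podaj_zakres_przystankow : Prop := ∀ (przystanki : String), Dom_podaj_zakres_przystankow przystanki → Spec_podaj_zakres_przystankow przystanki (podaj_zakres_przystankow przystanki)

-- ===== LEMMAS AND PROOFS =====

-- a Nat version of altLead, for index reasoning
def natLead : List Char → Nat
  | [] => 0
  | c :: t => if c == '_' then 1 + natLead t else 0

theorem altLead_eq_natLead (l : List Char) : altLead l = (natLead l : Int) := by
  induction l with
  | nil => simp [altLead, natLead]
  | cons c t ih => by_cases h : c == '_' <;> simp [altLead, natLead, h, ih]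

theorem natLead_le_length (l : List Char) : natLead l ≤ l.length := by
  induction l with
  | nil => simp [natLead]
  | cons c t ih => by_cases h : c == '_' <;> simp [natLead, h] <;> omega

theorem getD_lt_natLead (l : List Char) (j : Nat) (h : j < natLead l) :
    l.getD j ' ' = '_' := by
  induction l generalizing j with
  | nil => simp [natLead] at h
  | cons c t ih =>
    by_cases hc : c == '_'
    · cases j with
      | zero => simpa [List.getD] using beq_iff_eq.mp hc
      | succ j =>
        have h' : j < natLead t := by simp [natLead, hc] at h; omega
        simpa [List.getD] using ih j h'
    · have : natLead (c :: t) = 0 := by simp [natLead, hc]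
      omega

theorem getD_natLead_ne (l : List Char) (h : natLead l < l.length) :
    (l.getD (natLead l) ' ' == '_') = false := by
  induction l with
  | nil => simp at h
  | cons c t ih =>
    by_cases hc : c == '_'
    · simp only [natLead, hc, if_true, Nat.add_comm 1 (natLead t)]
      have ht : natLead t < t.length := by
        have : natLead (c :: t) = 1 + natLead t := by simp [natLead, hc]
        simp [this] at h; omega
      simpa [List.getD] using ih ht
    · have hcf : (c == '_') = false := by simpa using hc
      simp [natLead, hcf, List.getD]

-- a fold over a pair whose components are updated independently splits into two folds
theorem foldl_prod_split {α β : Type} (xs : List Nat) (f : α → α) (g : β → Nat → β)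
    (a : α) (b : β) :
    xs.foldl (fun st i => (f st.1, g st.2 i)) (a, b)
      = (xs.foldl (fun p _ => f p) a, xs.foldl g b) := by
  induction xs generalizing a b with
  | nil => rfl
  | cons x xs ih => simpa using ih (f a) (g b x)

-- the `pierwszy` fold computes the number of leading underscores
theorem lead_fold (l : List Char) (m : Nat) (hm : m ≤ l.length) :
    (List.range m).foldl
        (fun (p : Int) _ => if (PySem.List.pyGet? l p).getD ' ' == '_' then p + 1 else p) 0
      = ((min (natLead l) m : Nat) : Int) := by
  induction m with
  | zero => simp
  | succ m ih =>
    have hm' : m ≤ l.length := Nat.le_of_succ_le hm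
    rw [List.range_succ, List.foldl_append, ih hm', List.foldl_cons, List.foldl_nil]
    by_cases hcase : natLead l ≤ m
    · have hlt : natLead l < l.length := lt_of_le_of_lt hcase hm
      have hget : PySem.List.pyGet? l ((natLead l : Nat) : Int) = some (l[natLead l]'hlt) := by
        simpa using (List.getElem?_eq_getElem hlt)
      have hne : (l[natLead l]'hlt == '_') = false := by
        have h0 := getD_natLead_ne l hlt
        rwa [List.getD_eq_getElem l ' ' hlt] at h0
      rw [Nat.min_eq_left hcase, Nat.min_eq_left (by omega), hget]
      simp [hne]
    · have hmlt : m < natLead l := Nat.lt_of_not_le hcase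
      have hlt : m < l.length := hm
      have hget : PySem.List.pyGet? l ((m : Nat) : Int) = some (l[m]'hlt) := by
        simpa using (List.getElem?_eq_getElem hlt)
      have heq : (l[m]'hlt == '_') = true := by
        have h1 : l.getD m ' ' = '_' := getD_lt_natLead l m hmlt
        rw [List.getD_eq_getElem l ' ' hlt] at h1
        exact beq_iff_eq.mpr h1
      rw [Nat.min_eq_right (le_of_lt hmlt), Nat.min_eq_right hmlt, hget]
      simp [heq]

-- the `ostatni` fold is the first hit of the reversed index list (break), else the start value
theorem last_fold (l : List Char) (xs : List Nat) (d : Int) :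
    xs.foldl (fun (o : Int) i => if l.getD i ' ' != '_' then (i : Int) else o) d
      = (match xs.reverse.find? (fun i => l.getD i ' ' != '_') with
         | some i => (i : Int)
         | none => d) := by
  induction xs generalizing d with
  | nil => rfl
  | cons x xs ih =>
    simp only [List.foldl_cons, List.reverse_cons, List.find?_append]
    rw [ih]
    cases hfind : xs.reverse.find? (fun i => l.getD i ' ' != '_') with
    | some y => simp
    | none =>
      cases hx : (l.getD x ' ' != '_') <;> simp_all [List.getD]

-- ===== VERDICT (by name: the statement is the Claim_ definition above) =====
theorem podaj_zakres_przystankow_spec : Claim_equal_podaj_zakres_przystankow := by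
  intro s _
  unfold Spec_podaj_zakres_przystankow podaj_zakres_przystankow podaj_zakres_przystankow_alt
  set l := s.toList with hl
  refine Eq.trans (foldl_prod_split (List.range l.length)
      (fun (p : Int) => if (PySem.List.pyGet? l p).getD ' ' == '_' then p + 1 else p)
      (fun (o : Int) (i : Nat) => if l.getD i ' ' != '_' then (i : Int) else o)
      0 ((l.length : Int) - 1)) ?_
  rw [Prod.mk.injEq]
  refine ⟨?_, ?_⟩
  · rw [lead_fold l l.length le_rfl, altLead_eq_natLead,
        Nat.min_eq_left (natLead_le_length l)]
  · exact last_fold l (List.range l.length) ((l.length : Int) - 1)
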